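-- pv_equiv track=rewrite | github.com/VictorMeyer77/tln_politics_debate | gpt/tokenizer.py | removeRt
-- ===== SOURCE A (Python) =====
-- def removeRt(tokens):
--
--     cleanTokens = []
--
--     for token in tokens:
--
--         tokenBuffer = ""
--         words = token.split(" ")
--
--         for i in range(len(words)):
--
--             if not (words[i] == "RT" or (i > 0 and words[i - 1] == "RT")):
--                 tokenBuffer += (words[i] + " ")
--
--         cleanTokens.append(tokenBuffer.strip())
--
--     return cleanTokens
-- ===== SOURCE B (Python) =====
-- def removeRt(tokens):
--     def clean(ws):
--         if not ws:
--             return []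
--         if ws[0] != "RT":
--             return [ws[0]] + clean(ws[1:])
--         if len(ws) >= 2 and ws[1] == "RT":
--             return clean(ws[1:])
--         return clean(ws[2:])
--     return [" ".join(clean(token.split(" "))).strip() for token in tokens]
-- ===== Notes on version B (the rewrite author's own statement) =====
-- stated objective: alternative
-- what changed: Replaces A's index loop with a previous-word lookback and string-buffer concatenation by a memoryless recursive consumer that pattern-matches the word list and consumes the 'RT' marker together with its successor in one step (with an RT-RT overlap case), then joins the kept words.
import Mathlib
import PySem

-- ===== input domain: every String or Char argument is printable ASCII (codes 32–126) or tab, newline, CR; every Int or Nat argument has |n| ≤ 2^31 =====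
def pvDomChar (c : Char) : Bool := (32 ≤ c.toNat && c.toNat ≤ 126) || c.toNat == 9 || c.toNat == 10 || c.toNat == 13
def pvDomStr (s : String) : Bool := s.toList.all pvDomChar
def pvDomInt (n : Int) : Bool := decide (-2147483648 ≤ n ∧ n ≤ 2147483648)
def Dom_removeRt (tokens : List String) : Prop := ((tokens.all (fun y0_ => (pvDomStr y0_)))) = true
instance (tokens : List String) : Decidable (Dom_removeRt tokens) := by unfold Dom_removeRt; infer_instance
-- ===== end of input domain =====

-- B replaces A's index loop with previous-word lookback and buffer concatenation by a
-- memoryless recursive consumer that pattern-matches the word list, removing each 'RT'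
-- together with its successor in one step; same cost, different decomposition.

-- ===== PORT A =====
-- A's inner loop: for i in range(len(words)): if not (words[i] == "RT" or (i > 0 and
-- words[i-1] == "RT")): tokenBuffer += words[i] + " ".  words[i] for i < len(words) is
-- exact as getD; the buffer is kept as List Char (string concatenation = list append).
def removeRt (tokens : List String) : List String :=
  tokens.foldl
    (fun cleanTokens token =>
      let words := PySem.Chars.splitOn token.toList [' ']
      let tokenBuffer := (List.range words.length).foldl
        (fun buf i =>
          if !(words.getD i [] == "RT".toList ||
               (decide (0 < i) && words.getD (i - 1) [] == "RT".toList))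
          then buf ++ (words.getD i [] ++ [' '])
          else buf) []
      cleanTokens ++ [String.mk (PySem.Chars.strip tokenBuffer)]) []

-- ===== PORT B =====
-- Source B's recursive helper clean: [] → []; head ≠ "RT" → keep head, recurse on tail;
-- head = "RT" and next = "RT" → recurse on ws[1:]; otherwise recurse on ws[2:].
def cleanWords : List (List Char) → List (List Char)
  | [] => []
  | w :: rest =>
    if !(w == "RT".toList) then w :: cleanWords rest
    else if decide (2 ≤ rest.length + 1) && (rest.getD 0 [] == "RT".toList) then
      cleanWords rest
    else cleanWords (rest.drop 1)
termination_by ws => ws.length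
decreasing_by
  · simp
  · simp
  · simp

def removeRt_alt (tokens : List String) : List String :=
  tokens.map (fun token =>
    String.mk (PySem.Chars.strip
      (PySem.Chars.join [' '] (cleanWords (PySem.Chars.splitOn token.toList [' '])))))

-- ===== PRECONDITION & SPEC =====
def Spec_removeRt (tokens : List String) (out : List String) : Prop := out = removeRt_alt tokens
instance (tokens : List String) (out : List String) : Decidable (Spec_removeRt tokens out) := by unfold Spec_removeRt; infer_instance

-- ===== CLAIM (what is proved, stated in full; the proofs are below) =====
def Claim_equal_removeRt : Prop := ∀ (tokens : List String), Dom_removeRt tokens → Spec_removeRt tokens (removeRt tokens)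

-- ===== LEMMAS AND PROOFS =====

-- the reference recursion both kept-word lists are reduced to: a flag 'previous word was RT'
def refKeep : Bool → List (List Char) → List (List Char)
  | _, [] => []
  | prev, w :: ws =>
    if (w == "RT".toList || prev) then refKeep (w == "RT".toList) ws
    else w :: refKeep (w == "RT".toList) ws

-- A's kept indices, with the lookback generalized to a flag at position 0
def Fp (prev : Bool) (ws : List (List Char)) : List (List Char) :=
  ((List.range ws.length).filter
    (fun i => !(ws.getD i [] == "RT".toList ||
      (if i = 0 then prev else ws.getD (i - 1) [] == "RT".toList)))).map
    (fun i => ws.getD i [])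

-- A's guarded accumulating loop, as filter + flatMap.
theorem foldl_if_append_flat {α β : Type} (p : α → Bool) (g : α → List β)
    (l : List α) (acc : List β) :
    l.foldl (fun buf x => if p x then buf ++ g x else buf) acc
      = acc ++ (l.filter p).flatMap g := by
  induction l generalizing acc with
  | nil => simp
  | cons x xs ih =>
    by_cases h : p x = true <;> simp [h, ih, List.append_assoc]

-- stripping is unaffected by one trailing space
theorem strip_append_space (xs : List Char) :
    PySem.Chars.strip (xs ++ [' ']) = PySem.Chars.strip xs := by
  have hsp : PySem.Chars.isspace ' ' = true := by decide
  unfold PySem.Chars.strip PySem.Chars.lstrip PySem.Chars.rstrip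
  rw [List.dropWhile_append]
  by_cases h : (List.dropWhile PySem.Chars.isspace xs).isEmpty = true
  · rw [List.isEmpty_iff] at h
    simp [h, hsp]
  · simp only [h, if_neg, Bool.false_eq_true, not_false_iff, List.reverse_append,
      List.reverse_cons, List.reverse_nil, List.nil_append, List.singleton_append,
      List.dropWhile_cons, hsp, if_pos]

-- flatMap with trailing spaces is the space-join plus one trailing space
theorem flatMap_space (ws : List (List Char)) (h : ws ≠ []) :
    ws.flatMap (fun w => w ++ [' ']) = PySem.Chars.join [' '] ws ++ [' '] := by
  induction ws with
  | nil => cases h rfl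
  | cons w ws ih =>
    cases ws with
    | nil => simp [PySem.Chars.join, List.intercalate]
    | cons v vs =>
      rw [List.flatMap_cons, ih (by simp)]
      simp [PySem.Chars.join, List.intercalate]

-- flatMap with trailing spaces strips to the space-join
theorem strip_flat_eq_strip_join (ws : List (List Char)) :
    PySem.Chars.strip (ws.flatMap (fun w => w ++ [' ']))
      = PySem.Chars.strip (PySem.Chars.join [' '] ws) := by
  cases ws with
  | nil => simp [PySem.Chars.join, List.intercalate]
  | cons w ws' => rw [flatMap_space _ (by simp), strip_append_space]

-- peeling one word off the indexed filter
theorem Fp_cons (prev : Bool) (w : List Char) (rest : List (List Char)) :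
    Fp prev (w :: rest)
      = (if (w == "RT".toList || prev) = true then [] else [w])
        ++ Fp (w == "RT".toList) rest := by
  unfold Fp
  rw [List.length_cons, List.range_succ_eq_map, List.filter_cons]
  have hp : ∀ i ∈ List.range rest.length,
      ((fun i => !((w :: rest).getD i [] == "RT".toList ||
        (if i = 0 then prev else (w :: rest).getD (i - 1) [] == "RT".toList))) ∘ Nat.succ) i
      = (fun i => !(rest.getD i [] == "RT".toList ||
        (if i = 0 then (w == "RT".toList) else rest.getD (i - 1) [] == "RT".toList))) i := by
    intro i _
    cases i with
    | zero => simp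
    | succ j => simp
  have h0 : (!((w :: rest).getD 0 [] == "RT".toList ||
      (if (0 : Nat) = 0 then prev else (w :: rest).getD (0 - 1) [] == "RT".toList)))
      = !(w == "RT".toList || prev) := by simp
  rw [h0]
  cases hval : (w == "RT".toList || prev) with
  | true =>
    simp only [Bool.not_true, Bool.false_eq_true, if_neg, not_false_iff,
      if_pos, List.nil_append]
    rw [List.filter_map, List.filter_congr hp, List.map_map]
    apply List.map_congr_left
    intro i _
    simp
  | false =>
    simp only [Bool.not_false, if_pos, Bool.false_eq_true, if_neg,
      not_false_iff, List.map_cons, List.getD_cons_zero, List.singleton_append]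
    congr 1
    rw [List.filter_map, List.filter_congr hp, List.map_map]
    apply List.map_congr_left
    intro i _
    simp

theorem Fp_eq_ref (ws : List (List Char)) : ∀ prev, Fp prev ws = refKeep prev ws := by
  induction ws with
  | nil => intro prev; simp [Fp, refKeep]
  | cons w rest ih =>
    intro prev
    rw [Fp_cons, ih]
    by_cases hw : w = ['R', 'T']
    · subst hw; cases prev <;> simp [refKeep]
    · cases prev <;> simp [refKeep, hw]

theorem cleanWords_eq_ref (ws : List (List Char)) : cleanWords ws = refKeep false ws := by
  have H : ∀ n (ws : List (List Char)), ws.length ≤ n → cleanWords ws = refKeep false ws := by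
    intro n
    induction n with
    | zero =>
      intro ws h
      have : ws = [] := by cases ws <;> simp_all
      subst this; simp [cleanWords, refKeep]
    | succ n ih =>
      intro ws h
      cases ws with
      | nil => simp [cleanWords, refKeep]
      | cons w rest =>
        simp only [List.length_cons, Nat.succ_le_succ_iff] at h
        by_cases hw : w = ['R', 'T']
        · subst hw
          cases rest with
          | nil => simp [cleanWords, refKeep]
          | cons w2 rest2 =>
            have h2 : rest2.length ≤ n := by simp at h; omega
            by_cases hw2 : w2 = ['R', 'T']
            · subst hw2
              rw [show cleanWords (['R', 'T'] :: ['R', 'T'] :: rest2)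
                  = cleanWords (['R', 'T'] :: rest2) by simp [cleanWords]]
              rw [ih _ h]
              simp [refKeep]
            · rw [show cleanWords (['R', 'T'] :: w2 :: rest2) = cleanWords rest2 by
                simp [cleanWords, hw2]]
              rw [ih _ h2]
              have hb : (w2 == ['R', 'T']) = false := by simp [hw2]
              simp [refKeep, hb]
        · rw [show cleanWords (w :: rest) = w :: cleanWords rest by
            simp [cleanWords, hw]]
          rw [ih _ h]
          have hb : (w == ['R', 'T']) = false := by simp [hw]
          simp [refKeep, hb]
  exact H ws.length ws le_rfl

-- A's filter predicate equals the flag form at prev = false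
theorem A_filter_eq (ws : List (List Char)) :
    ((List.range ws.length).filter
      (fun i => !(ws.getD i [] == "RT".toList ||
        (decide (0 < i) && ws.getD (i - 1) [] == "RT".toList)))).map (fun i => ws.getD i [])
      = Fp false ws := by
  unfold Fp
  congr 1
  apply List.filter_congr
  intro i _
  cases i <;> simp

-- the per-token results agree
theorem token_eq (token : String) :
    (let words := PySem.Chars.splitOn token.toList [' ']
     String.mk (PySem.Chars.strip ((List.range words.length).foldl
       (fun buf i =>
         if !(words.getD i [] == "RT".toList ||
              (decide (0 < i) && words.getD (i - 1) [] == "RT".toList))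
         then buf ++ (words.getD i [] ++ [' '])
         else buf) [])))
    = String.mk (PySem.Chars.strip
        (PySem.Chars.join [' '] (cleanWords (PySem.Chars.splitOn token.toList [' '])))) := by
  simp only []
  set ws := PySem.Chars.splitOn token.toList [' '] with hws
  congr 1
  rw [foldl_if_append_flat, List.nil_append]
  have h1 : List.flatMap (fun i => ws.getD i [] ++ [' '])
      ((List.range ws.length).filter
        (fun i => !(ws.getD i [] == "RT".toList ||
          (decide (0 < i) && ws.getD (i - 1) [] == "RT".toList))))
      = List.flatMap (fun w => w ++ [' '])
        (((List.range ws.length).filter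
          (fun i => !(ws.getD i [] == "RT".toList ||
            (decide (0 < i) && ws.getD (i - 1) [] == "RT".toList)))).map
          (fun i => ws.getD i [])) := by
    rw [List.flatMap_map]
  rw [h1, strip_flat_eq_strip_join, A_filter_eq, Fp_eq_ref, ← cleanWords_eq_ref]

-- ===== VERDICT (by name: the statement is the Claim_ definition above) =====
theorem removeRt_spec : Claim_equal_removeRt := by
  unfold Claim_equal_removeRt
  intro tokens _
  unfold Spec_removeRt removeRt removeRt_alt
  rw [PySem.List.foldl_append_singleton_eq_map, List.nil_append]
  apply List.map_congr_left
  intro token _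
  exact token_eq token
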